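-- pv_equiv track=rewrite | github.com/jianningzhuang/CS1010X-Programming_Methodology | Week 5/Extra Practice.py | next_lowest
-- ===== SOURCE A (Python) =====
-- def compare_cards(card1, card2):
--     c1 = 'Z' if card1[0] == 'A' else card1[0]
--     c1 = 'Y' if card1[0] == 'K' else c1
--     c1 = 'B' if card1[0] == 'T' else c1
--     c2 = 'Z' if card2[0] == 'A' else card2[0]
--     c2 = 'Y' if card2[0] == 'K' else c2
--     c2 = 'B' if card2[0] == 'T' else c2
--     return card1[1] > card2[1] if c1 == c2 else c1 > c2
--
-- def next_lowest(result, deck):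
--     if result == ():
--         min_card = None
--         for card in deck:
--             if min_card == None or compare_cards(min_card, card):
--                 min_card = card
--         result += (min_card, )
--     else:
--         next_min = result[-1]
--         for card in deck:
--             if next_min == result[-1] and compare_cards(card, next_min):
--                 next_min = card
--             else:
--                 if compare_cards(next_min, card) and compare_cards(card, result[-1]):
--                     next_min = card
--         result += (next_min, )
--     return result
-- ===== SOURCE B (Python) =====
-- _RANK = {'A': 'Z', 'K': 'Y', 'T': 'B'}
--
--
-- def _key(card):
--     r = card[0:1]
--     return _RANK.get(r, r) + card[1:2]
--
--
-- def next_lowest(result, deck):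
--     s = sorted(deck, key=_key)
--     if not result:
--         return result + ((s[0],) if s else (None,))
--     last = result[-1]
--     kl = _key(last)
--     for card in s:
--         if _key(card) > kl:
--             return result + (card,)
--     return result + (last,)
-- ===== Notes on version B (the rewrite author's own statement) =====
-- stated objective: alternative
-- what changed: Replaces A's stateful two-regime tracking scan (with its next_min==result[-1] mode flag) by sort-then-scan: sort the deck once by a sortable string key (remapped rank char + suit char) and return the first sorted card whose key exceeds the last result card's key (or the sorted head when result is empty).
-- outside the precondition, e.g. on next_lowest((), []): A returns (None,), B returns (None,)
import Mathlib
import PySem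

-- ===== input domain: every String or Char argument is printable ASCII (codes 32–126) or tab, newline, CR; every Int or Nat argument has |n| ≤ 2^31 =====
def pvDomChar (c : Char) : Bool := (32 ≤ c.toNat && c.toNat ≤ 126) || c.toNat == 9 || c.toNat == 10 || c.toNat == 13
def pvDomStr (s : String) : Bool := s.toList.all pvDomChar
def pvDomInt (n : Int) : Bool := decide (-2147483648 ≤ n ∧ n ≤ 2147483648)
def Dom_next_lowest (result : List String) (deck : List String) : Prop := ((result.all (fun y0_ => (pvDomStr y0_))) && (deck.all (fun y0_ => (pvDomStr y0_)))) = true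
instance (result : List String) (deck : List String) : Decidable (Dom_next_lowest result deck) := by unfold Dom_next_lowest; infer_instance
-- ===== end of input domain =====

-- B sorts the deck once by a sortable string key and takes the first card after the last result card (objective: alternative, sort-then-scan instead of A's stateful tracking scan).

-- ===== PORT A =====
-- card[k] is read via pyGet? with a default, total; Python reads card1[1]/card2[1] lazily (only
-- on rank ties), so a rank tie touching a card shorter than 2 characters behaves differently —
-- Pre_next_lowest excludes every input on which such a tie can arise.
def compare_cards (card1 card2 : String) : Bool :=
  let a0 := (PySem.Str.pyGet? card1 0).getD ' '
  let b0 := (PySem.Str.pyGet? card2 0).getD ' '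
  let c1 := if a0 = 'A' then 'Z' else a0
  let c1 := if a0 = 'K' then 'Y' else c1
  let c1 := if a0 = 'T' then 'B' else c1
  let c2 := if b0 = 'A' then 'Z' else b0
  let c2 := if b0 = 'K' then 'Y' else c2
  let c2 := if b0 = 'T' then 'B' else c2
  if c1 = c2 then decide ((PySem.Str.pyGet? card2 1).getD ' ' < (PySem.Str.pyGet? card1 1).getD ' ')
  else decide (c2 < c1)

def next_lowest (result : List String) (deck : List String) : List String :=
  if result = [] then
    let min_card := deck.foldl (fun min_card card =>
      match min_card with
      | none => some card
      | some m => if compare_cards m card then some card else min_card)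
      (none : Option String)
    match min_card with
    | some m => result ++ [m]
    | none => result    -- Python appends None here (empty deck); None is no String value — outside Pre_
  else
    let last := (PySem.List.pyGet? result (-1)).getD ""
    let next_min := deck.foldl (fun next_min card =>
      if next_min == last && compare_cards card next_min then card
      else if compare_cards next_min card && compare_cards card last then card
      else next_min) last
    result ++ [next_min]

-- ===== PORT B =====
def pyRANK : PySem.Dict String String := PySem.Dict.mk [("A", "Z"), ("K", "Y"), ("T", "B")]

-- _key(card): the remapped rank character (card[0:1], a slice, so no IndexError) followed by
-- the suit slice card[1:2]; Python's str '<'/'>' on the keys is Lean's '<' on String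
def keyB (card : String) : String :=
  let r := PySem.Str.slice card (some 0) (some 1)
  PySem.Dict.getD pyRANK r r ++ PySem.Str.slice card (some 1) (some 2)

def next_lowest_alt (result : List String) (deck : List String) : List String :=
  let s := PySem.List.sorted deck keyB
  if result == [] then
    -- '(s[0],) if s else (None,)': Python B appends None on an empty deck; None is no String value — outside Pre_
    match s with
    | [] => result
    | m :: _ => result ++ [m]
  else
    let last := (PySem.List.pyGet? result (-1)).getD ""
    let kl := keyB last
    -- 'for card in s: if _key(card) > kl: return result + (card,)' — first match in the sorted deck
    match s.find? (fun card => decide (kl < keyB card)) with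
    | some card => result ++ [card]
    | none => result ++ [last]

-- ===== PRECONDITION & SPEC =====
-- the rank remapping, the suit character and the candidate test, restated on the raw input
-- so Pre_ stays independent of both ports
def preRank (card : String) : Char :=
  match card.toList with
  | [] => ' '
  | c :: _ => if c = 'T' then 'B' else if c = 'K' then 'Y' else if c = 'A' then 'Z' else c

def suitCh (card : String) : Char := card.toList.getD 1 ' '

def tieOK (a b : String) : Prop :=
  preRank a = preRank b → (2 ≤ a.toList.length ∧ 2 ≤ b.toList.length)

-- a min-scan over xs touches a suit character only when a card ties in rank with the running
-- minimum, i.e. with a rank that is minimal among the earlier cards: exactly those ties must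
-- be between cards long enough to carry a suit
def scanOK (xs : List String) : Prop :=
  ∀ j < xs.length, ∀ i < j,
    preRank (xs.getD i "") = preRank (xs.getD j "") →
    (∀ k < j, preRank (xs.getD i "") ≤ preRank (xs.getD k "")) →
    (2 ≤ (xs.getD i "").toList.length ∧ 2 ≤ (xs.getD j "").toList.length)

def candGT (c last : String) : Bool :=
  if preRank c = preRank last then decide (suitCh last < suitCh c)
  else decide (preRank last < preRank c)

-- Pre_ excludes (i) result = [] with deck = [] (A returns (None,), which is not a tuple of
-- strings) and (ii) inputs where A's scan compares a rank-tied pair one of which is too short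
-- to carry a suit character (A raises IndexError reading card[1]): every card in play must be
-- nonempty, every card must tie safely with the last result card, and rank ties with the
-- running minimum (among all cards when result is empty, among the candidates above the last
-- result card otherwise) must be between cards of length ≥ 2.
def Pre_next_lowest (result : List String) (deck : List String) : Prop :=
  (result ≠ [] ∨ deck ≠ []) ∧
  (result = [] →
    deck.length ≤ 1 ∨ ((∀ c ∈ deck, 1 ≤ c.toList.length) ∧ scanOK deck)) ∧
  (result ≠ [] →
    deck = [] ∨
      ((∀ c ∈ deck, 1 ≤ c.toList.length) ∧ 1 ≤ (result.getLast?.getD "").toList.length ∧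
       (∀ c ∈ deck, tieOK c (result.getLast?.getD "")) ∧
       scanOK (deck.filter (fun c => candGT c (result.getLast?.getD "")))))
instance (result : List String) (deck : List String) : Decidable (Pre_next_lowest result deck) := by
  unfold Pre_next_lowest
  exact @instDecidableAnd _ _ inferInstance (@instDecidableAnd _ _
    (by unfold scanOK; infer_instance) (by unfold scanOK tieOK; infer_instance))

def pvWitness_next_lowest : List String × List String := (["2H"], ["3H", "KS"])

def Spec_next_lowest (result : List String) (deck : List String) (out : List String) : Prop :=
  out = next_lowest_alt result deck
instance (result : List String) (deck : List String) (out : List String) :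
    Decidable (Spec_next_lowest result deck out) := by unfold Spec_next_lowest; infer_instance

-- ===== CLAIM (what is proved, stated in full; the proofs are below) =====
def Claim_equal_next_lowest : Prop := ∀ (result : List String) (deck : List String),
  Dom_next_lowest result deck → Pre_next_lowest result deck →
  Spec_next_lowest result deck (next_lowest result deck)

-- ===== LEMMAS AND PROOFS =====

theorem compare_irrefl (a : String) : compare_cards a a = false := by
  simp [compare_cards]

-- A's first-minimal accumulator step, shared shape of both of A's characterizations
def cStep (best : Option String) (card : String) : Option String :=
  match best with
  | none => some card
  | some m => if compare_cards m card then some card else best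

-- A's first loop is the first-minimal fold
theorem loop1_eq (xs : List String) (mc : Option String) :
    xs.foldl (fun min_card card =>
      match min_card with
      | none => some card
      | some m => if compare_cards m card then some card else min_card) mc
    = xs.foldl cStep mc := by
  apply PySem.List.foldl_congr_mem
  intro acc c _
  cases acc <;> rfl

-- A's second loop once a candidate (> last) has been found: the min fold over the candidates
theorem loop2B (last : String) (xs : List String) : ∀ (nm : String),
    compare_cards nm last = true →
    xs.foldl (fun next_min card =>
      if next_min == last && compare_cards card next_min then card
      else if compare_cards next_min card && compare_cards card last then card
      else next_min) nm
    = ((xs.filter (fun c => compare_cards c last)).foldl cStep (some nm)).getD last := by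
  induction xs with
  | nil => intro nm _; simp
  | cons c xs ih =>
    intro nm hnm
    have hne : (nm == last) = false := by
      apply beq_eq_false_iff_ne.mpr
      intro h; rw [h, compare_irrefl] at hnm; exact Bool.false_ne_true hnm
    simp only [List.foldl_cons, List.filter_cons, hne, Bool.false_and, Bool.false_eq_true,
      if_false]
    by_cases hc : compare_cards c last = true
    · simp only [hc, Bool.and_true, if_true, List.foldl_cons, cStep]
      by_cases hgt : compare_cards nm c = true
      · simp only [hgt, if_true]
        exact ih c hc
      · simp only [Bool.not_eq_true] at hgt
        simp only [hgt, Bool.false_eq_true, if_false]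
        exact ih nm hnm
    · simp only [Bool.not_eq_true] at hc
      simp only [hc, Bool.and_false, Bool.false_eq_true, if_false]
      exact ih nm hnm

-- A's second loop from its start state 'last': min of the candidates, or last if there are none
theorem loop2A (last : String) (xs : List String) :
    xs.foldl (fun next_min card =>
      if next_min == last && compare_cards card next_min then card
      else if compare_cards next_min card && compare_cards card last then card
      else next_min) last
    = ((xs.filter (fun c => compare_cards c last)).foldl cStep none).getD last := by
  induction xs with
  | nil => simp
  | cons c xs ih =>
    simp only [List.foldl_cons, List.filter_cons, beq_self_eq_true, Bool.true_and]
    by_cases hc : compare_cards c last = true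
    · simp only [hc, if_true, List.foldl_cons, cStep]
      exact loop2B last xs c hc
    · simp only [Bool.not_eq_true] at hc
      simp only [hc, Bool.and_false, Bool.false_eq_true, if_false]
      exact ih

-- ─── B's side: what find? over a stable insertion sort computes ───

-- the key-based first-minimal step
def kStep {α κ : Type} [LinearOrder κ] (key : α → κ) (best : Option α) (c : α) : Option α :=
  match best with
  | none => some c
  | some m => if key c < key m then some c else best

theorem find?_insertBy {α κ : Type} [LinearOrder κ] (key : α → κ) (p : α → Bool) (x : α) :
    ∀ (s : List α), s.Pairwise (fun a b => key a ≤ key b) →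
    (PySem.List.insertBy (fun a b => decide (key a < key b)) x s).find? p
    = if p x then kStep key (s.find? p) x else s.find? p := by
  intro s
  induction s with
  | nil =>
    intro _
    simp only [PySem.List.insertBy, List.find?]
    cases hp : p x <;> simp [kStep]
  | cons y ys ih =>
    intro hpw
    have hys : ys.Pairwise (fun a b => key a ≤ key b) := hpw.of_cons
    have hyle : ∀ m ∈ ys, key y ≤ key m := by
      intro m hm; exact (List.pairwise_cons.mp hpw).1 m hm
    simp only [PySem.List.insertBy]
    by_cases hxy : key x < key y
    · simp only [decide_eq_true_eq, if_pos hxy]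
      cases hp : p x with
      | true =>
        rw [List.find?_cons_of_pos hp, if_pos rfl]
        cases hf : (y :: ys).find? p with
        | none => simp [kStep]
        | some m =>
          have hm : m ∈ y :: ys := List.mem_of_find?_eq_some hf
          have hlt : key x < key m := by
            rcases List.mem_cons.mp hm with h | h
            · rwa [h]
            · exact lt_of_lt_of_le hxy (hyle m h)
          simp [kStep, hlt]
      | false =>
        rw [List.find?_cons_of_neg (by simp [hp])]
        simp
    · simp only [decide_eq_true_eq, if_neg hxy]
      cases hpy : p y with
      | true =>
        rw [List.find?_cons_of_pos hpy, List.find?_cons_of_pos hpy]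
        cases hp : p x with
        | false => simp
        | true => simp [kStep, hxy]
      | false =>
        rw [List.find?_cons_of_neg (by simp [hpy]), List.find?_cons_of_neg (by simp [hpy])]
        exact ih hys

theorem sorted_find? {α κ : Type} [LinearOrder κ] (key : α → κ) (p : α → Bool) (xs : List α) :
    (PySem.List.sorted xs key).find? p = (xs.filter p).foldl (kStep key) none := by
  induction xs using List.reverseRecOn with
  | nil => rfl
  | append_singleton xs x ih =>
    have hsorted : PySem.List.sorted (xs ++ [x]) key
        = PySem.List.insertBy (fun a b => decide (key a < key b)) x (PySem.List.sorted xs key) := by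
      simp [PySem.List.sorted, List.foldl_append]
    rw [hsorted, find?_insertBy key p x _ (PySem.List.sorted_pairwise xs key), ih,
      List.filter_append]
    cases hp : p x with
    | true => simp [hp, List.foldl_append]
    | false => simp [hp]

-- ─── the bridge between B's key order and A's compare_cards, under Pre_'s shape facts ───

-- two cards A can safely compare: nonempty, and a rank tie implies both suits exist
def goodPair (a b : String) : Prop :=
  1 ≤ a.toList.length ∧ 1 ≤ b.toList.length ∧
    (preRank a = preRank b → 2 ≤ a.toList.length ∧ 2 ≤ b.toList.length)

theorem getD_pyRANK_toList (r : String) (x : Char) (h : r.toList = [x]) :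
    (PySem.Dict.getD pyRANK r r).toList
    = [if x = 'T' then 'B' else if x = 'K' then 'Y' else if x = 'A' then 'Z' else x] := by
  by_cases hT : x = 'T'
  · have : r = "T" := String.toList_inj.mp (by rw [h, hT]; rfl)
    subst this; subst hT; decide
  by_cases hK : x = 'K'
  · have : r = "K" := String.toList_inj.mp (by rw [h, hK]; rfl)
    subst this; subst hK; decide
  by_cases hA : x = 'A'
  · have : r = "A" := String.toList_inj.mp (by rw [h, hA]; rfl)
    subst this; subst hA; decide
  · have bA : ("A" == r) = false := by
      apply beq_eq_false_iff_ne.mpr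
      intro he; rw [← he] at h; simp at h; exact hA h.symm
    have bK : ("K" == r) = false := by
      apply beq_eq_false_iff_ne.mpr
      intro he; rw [← he] at h; simp at h; exact hK h.symm
    have bT : ("T" == r) = false := by
      apply beq_eq_false_iff_ne.mpr
      intro he; rw [← he] at h; simp at h; exact hT h.symm
    simp [pyRANK, PySem.Dict.getD, PySem.Dict.get?, bA, bK, bT, List.find?, h, hA, hK, hT]

theorem keyB_toList (c : String) (x : Char) (t : List Char) (h : c.toList = x :: t) :
    (keyB c).toList
      = (if x = 'T' then 'B' else if x = 'K' then 'Y' else if x = 'A' then 'Z' else x)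
        :: t.take 1 := by
  have hr : (PySem.Str.slice c (some 0) (some 1)).toList = [x] := by simp [pysem, h]
  have hs : (PySem.Str.slice c (some 1) (some 2)).toList = t.take 1 := by simp [pysem, h]
  simp only [keyB, String.toList_append, getD_pyRANK_toList _ x hr, hs, List.singleton_append]

theorem preRank_eq (c : String) (x : Char) (t : List Char) (h : c.toList = x :: t) :
    preRank c = if x = 'T' then 'B' else if x = 'K' then 'Y' else if x = 'A' then 'Z' else x := by
  simp [preRank, h]

theorem key_bridge (a b : String) (h : a = b ∨ goodPair a b) :
    decide (keyB a < keyB b) = compare_cards b a := by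
  rcases h with he | ⟨ha1, hb1, htie⟩
  · subst he; rw [compare_irrefl]; simp
  · obtain ⟨x, ta, hx⟩ : ∃ x ta, a.toList = x :: ta := by
      cases hta : a.toList with
      | nil => rw [hta] at ha1; simp at ha1
      | cons u us => exact ⟨u, us, rfl⟩
    obtain ⟨y, tb, hy⟩ : ∃ y tb, b.toList = y :: tb := by
      cases htb : b.toList with
      | nil => rw [htb] at hb1; simp at hb1
      | cons u us => exact ⟨u, us, rfl⟩
    have ha0 : (PySem.Str.pyGet? a 0).getD ' ' = x := by simp [pysem, hx]
    have hb0 : (PySem.Str.pyGet? b 0).getD ' ' = y := by simp [pysem, hy]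
    have hlt : (keyB a < keyB b)
        ↔ ((if x = 'T' then 'B' else if x = 'K' then 'Y' else if x = 'A' then 'Z' else x)
             < (if y = 'T' then 'B' else if y = 'K' then 'Y' else if y = 'A' then 'Z' else y)
          ∨ ((if x = 'T' then 'B' else if x = 'K' then 'Y' else if x = 'A' then 'Z' else x)
             = (if y = 'T' then 'B' else if y = 'K' then 'Y' else if y = 'A' then 'Z' else y)
            ∧ ta.take 1 < tb.take 1)) := by
      rw [String.lt_iff_toList_lt, keyB_toList a x ta hx, keyB_toList b y tb hy,
        List.cons_lt_cons_iff]
    simp only [compare_cards, ha0, hb0]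
    by_cases hcc : (if x = 'T' then 'B' else if x = 'K' then 'Y' else if x = 'A' then 'Z' else x)
        = (if y = 'T' then 'B' else if y = 'K' then 'Y' else if y = 'A' then 'Z' else y)
    · -- a rank tie: goodPair guarantees both suit characters exist
      have htie' : preRank a = preRank b := by
        rw [preRank_eq a x ta hx, preRank_eq b y tb hy]; exact hcc
      obtain ⟨hla, hlb⟩ := htie htie'
      obtain ⟨a1, ta', hta⟩ : ∃ a1 ta', ta = a1 :: ta' := by
        cases hta : ta with
        | nil => rw [hx, hta] at hla; simp at hla
        | cons u us => exact ⟨u, us, rfl⟩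
      obtain ⟨b1, tb', htb⟩ : ∃ b1 tb', tb = b1 :: tb' := by
        cases htb : tb with
        | nil => rw [hy, htb] at hlb; simp at hlb
        | cons u us => exact ⟨u, us, rfl⟩
      have ha1' : (PySem.Str.pyGet? a 1).getD ' ' = a1 := by simp [pysem, hx, hta]
      have hb1' : (PySem.Str.pyGet? b 1).getD ' ' = b1 := by simp [pysem, hy, htb]
      have hsuit : (ta.take 1 < tb.take 1) ↔ a1 < b1 := by
        rw [hta, htb]
        simp [List.cons_lt_cons_iff, List.take]
      rw [if_pos hcc.symm, ha1', hb1']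
      have : (keyB a < keyB b) ↔ a1 < b1 := by
        rw [hlt, hsuit]
        constructor
        · rintro (hl | ⟨_, hl⟩)
          · exact absurd hcc (ne_of_lt hl)
          · exact hl
        · intro hl; exact Or.inr ⟨hcc, hl⟩
      rw [decide_eq_decide.mpr this]
    · -- different ranks: both compare the remapped rank characters
      rw [if_neg (fun he => hcc he.symm)]
      have : (keyB a < keyB b)
          ↔ (if x = 'T' then 'B' else if x = 'K' then 'Y' else if x = 'A' then 'Z' else x)
            < (if y = 'T' then 'B' else if y = 'K' then 'Y' else if y = 'A' then 'Z' else y) := by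
        rw [hlt]
        constructor
        · rintro (hl | ⟨he, _⟩)
          · exact hl
          · exact absurd he hcc
        · exact Or.inl
      rw [decide_eq_decide.mpr this]

-- the filtering predicates agree on cards that pair well with 'last'
theorem filter_bridge (last : String) (xs : List String)
    (h : ∀ c ∈ xs, c = last ∨ goodPair c last) :
    xs.filter (fun c => decide (keyB last < keyB c))
    = xs.filter (fun c => compare_cards c last) := by
  apply List.filter_congr
  intro c hc
  exact key_bridge last c ((h c hc).imp Eq.symm (fun g => ⟨g.2.1, g.1, fun t => (g.2.2 t.symm).symm⟩))

-- rank facts about a single comparison, on nonempty cards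
theorem compare_rank (a b : String) (ha : 1 ≤ a.toList.length) (hb : 1 ≤ b.toList.length) :
    (compare_cards a b = true → preRank b ≤ preRank a) ∧
    (compare_cards a b = false → preRank a ≤ preRank b) := by
  obtain ⟨x, ta, hx⟩ : ∃ x ta, a.toList = x :: ta := by
    cases hta : a.toList with
    | nil => rw [hta] at ha; simp at ha
    | cons u us => exact ⟨u, us, rfl⟩
  obtain ⟨y, tb, hy⟩ : ∃ y tb, b.toList = y :: tb := by
    cases htb : b.toList with
    | nil => rw [htb] at hb; simp at hb
    | cons u us => exact ⟨u, us, rfl⟩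
  have ha0 : (PySem.Str.pyGet? a 0).getD ' ' = x := by simp [pysem, hx]
  have hb0 : (PySem.Str.pyGet? b 0).getD ' ' = y := by simp [pysem, hy]
  rw [preRank_eq a x ta hx, preRank_eq b y tb hy]
  simp only [compare_cards, ha0, hb0]
  by_cases hcc : (if x = 'T' then 'B' else if x = 'K' then 'Y' else if x = 'A' then 'Z' else x)
      = (if y = 'T' then 'B' else if y = 'K' then 'Y' else if y = 'A' then 'Z' else y)
  · rw [if_pos hcc]
    exact ⟨fun _ => le_of_eq hcc.symm, fun _ => le_of_eq hcc⟩
  · rw [if_neg hcc]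
    exact ⟨fun h => le_of_lt (of_decide_eq_true h),
      fun h => le_of_not_gt (of_decide_eq_false h)⟩

-- the candidate test of Pre_ is A's comparison with the last result card
theorem candGT_eq (c last : String) (hc : 1 ≤ c.toList.length) (hl : 1 ≤ last.toList.length)
    (ht : tieOK c last) : candGT c last = compare_cards c last := by
  obtain ⟨x, ta, hx⟩ : ∃ x ta, c.toList = x :: ta := by
    cases hta : c.toList with
    | nil => rw [hta] at hc; simp at hc
    | cons u us => exact ⟨u, us, rfl⟩
  obtain ⟨y, tb, hy⟩ : ∃ y tb, last.toList = y :: tb := by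
    cases htb : last.toList with
    | nil => rw [htb] at hl; simp at hl
    | cons u us => exact ⟨u, us, rfl⟩
  have ha0 : (PySem.Str.pyGet? c 0).getD ' ' = x := by simp [pysem, hx]
  have hb0 : (PySem.Str.pyGet? last 0).getD ' ' = y := by simp [pysem, hy]
  simp only [candGT, compare_cards, ha0, hb0, preRank_eq c x ta hx, preRank_eq last y tb hy]
  by_cases hcc : (if x = 'T' then 'B' else if x = 'K' then 'Y' else if x = 'A' then 'Z' else x)
      = (if y = 'T' then 'B' else if y = 'K' then 'Y' else if y = 'A' then 'Z' else y)
  · obtain ⟨hlc, hll⟩ := ht (by rw [preRank_eq c x ta hx, preRank_eq last y tb hy]; exact hcc)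
    obtain ⟨a1, ta', hta⟩ : ∃ a1 ta', ta = a1 :: ta' := by
      cases hta : ta with
      | nil => rw [hx, hta] at hlc; simp at hlc
      | cons u us => exact ⟨u, us, rfl⟩
    obtain ⟨b1, tb', htb⟩ : ∃ b1 tb', tb = b1 :: tb' := by
      cases htb : tb with
      | nil => rw [hy, htb] at hll; simp at hll
      | cons u us => exact ⟨u, us, rfl⟩
    have hsc : suitCh c = a1 := by simp [suitCh, hx, hta]
    have hsl : suitCh last = b1 := by simp [suitCh, hy, htb]
    have ha1 : (PySem.Str.pyGet? c 1).getD ' ' = a1 := by simp [pysem, hx, hta]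
    have hb1 : (PySem.Str.pyGet? last 1).getD ' ' = b1 := by simp [pysem, hy, htb]
    rw [if_pos hcc, if_pos hcc, hsc, hsl, ha1, hb1]
  · rw [if_neg hcc, if_neg hcc]

-- list-index bookkeeping for the scan invariant
theorem getD_append_lt (l1 l2 : List String) (i : Nat) (h : i < l1.length) :
    (l1 ++ l2).getD i "" = l1[i] := by
  rw [List.getD_eq_getElem?_getD, List.getElem?_append_left h, ← List.getD_eq_getElem?_getD,
    List.getD_eq_getElem _ _ h]

theorem getD_append_mid (l1 l2 : List String) (x : String) :
    (l1 ++ x :: l2).getD l1.length "" = x := by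
  rw [List.getD_eq_getElem?_getD, List.getElem?_append_right (le_refl _)]
  simp

-- the two first-minimal folds agree along any scan Pre_ admits: the running minimum has the
-- least rank seen so far, so every rank tie the scan meets is one scanOK covers
theorem scan_fold_aux (suf : List String) : ∀ (pref : List String) (m : String),
    (∀ c ∈ pref ++ suf, 1 ≤ c.toList.length) → scanOK (pref ++ suf) →
    m ∈ pref → (∀ p ∈ pref, preRank m ≤ preRank p) →
    suf.foldl (kStep keyB) (some m) = suf.foldl cStep (some m) := by
  induction suf with
  | nil => intro _ _ _ _ _ _; rfl
  | cons c rest ih =>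
    intro pref m hlen hscan hm hmin
    have hlm : 1 ≤ m.toList.length := hlen m (List.mem_append_left _ hm)
    have hlc : 1 ≤ c.toList.length :=
      hlen c (List.mem_append_right _ List.mem_cons_self)
    have hgood : goodPair m c := by
      refine ⟨hlm, hlc, fun ht => ?_⟩
      obtain ⟨i, hi, him⟩ := List.mem_iff_getElem.mp hm
      have h1 : (pref ++ c :: rest).getD i "" = m := by
        rw [getD_append_lt _ _ _ hi]; exact him
      have h2 : (pref ++ c :: rest).getD pref.length "" = c := getD_append_mid _ _ _
      have := hscan pref.length (by simp) i hi (by rw [h1, h2]; exact ht)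
        (fun k hk => by
          rw [h1, getD_append_lt _ _ _ hk]
          exact hmin _ (List.getElem_mem hk))
      rw [h1, h2] at this
      exact this
    have hgood' : c = m ∨ goodPair c m := by
      exact Or.inr ⟨hgood.2.1, hgood.1, fun t => ⟨(hgood.2.2 t.symm).2, (hgood.2.2 t.symm).1⟩⟩
    have hstep : kStep keyB (some m) c = cStep (some m) c := by
      simp only [kStep, cStep]
      by_cases hk : keyB c < keyB m
      · have hcc : compare_cards m c = true := by
          rw [← key_bridge c m hgood']; exact decide_eq_true hk
        simp [hk, hcc]
      · have hcc : compare_cards m c = false := by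
          rw [← key_bridge c m hgood']; exact decide_eq_false hk
        simp [hk, hcc]
    have hEq : (pref ++ [c]) ++ rest = pref ++ c :: rest := by simp
    rw [List.foldl_cons, List.foldl_cons, hstep]
    by_cases hcc : compare_cards m c = true
    · have hc' : cStep (some m) c = some c := by simp [cStep, hcc]
      rw [hc']
      apply ih (pref ++ [c]) c
      · rw [hEq]; exact hlen
      · rw [hEq]; exact hscan
      · exact List.mem_append_right _ (List.mem_singleton.mpr rfl)
      · intro p hp
        rcases List.mem_append.mp hp with hp | hp
        · exact le_trans ((compare_rank m c hlm hlc).1 hcc) (hmin p hp)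
        · rw [List.mem_singleton.mp hp]
    · have hc' : cStep (some m) c = some m := by simp [cStep, hcc]
      rw [hc']
      apply ih (pref ++ [c]) m
      · rw [hEq]; exact hlen
      · rw [hEq]; exact hscan
      · exact List.mem_append_left _ hm
      · intro p hp
        rcases List.mem_append.mp hp with hp | hp
        · exact hmin p hp
        · rw [List.mem_singleton.mp hp]
          exact (compare_rank m c hlm hlc).2 (Bool.not_eq_true _ ▸ hcc)

theorem scan_fold (xs : List String) (hlen : ∀ c ∈ xs, 1 ≤ c.toList.length)
    (hscan : scanOK xs) :
    xs.foldl (kStep keyB) none = xs.foldl cStep none := by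
  cases xs with
  | nil => rfl
  | cons c rest =>
    simp only [List.foldl_cons]
    have h1 : kStep keyB none c = some c := rfl
    have h2 : cStep none c = some c := rfl
    rw [h1, h2]
    exact scan_fold_aux rest [c] c hlen hscan (List.mem_singleton.mpr rfl)
      (fun p hp => by rw [List.mem_singleton.mp hp])

theorem next_lowest_eq (result deck : List String) (hpre : Pre_next_lowest result deck) :
    next_lowest result deck = next_lowest_alt result deck := by
  obtain ⟨hne, hsh1, hsh2⟩ := hpre
  by_cases hr : result = []
  · -- empty result: A's first loop vs the head of B's sorted deck
    subst hr
    have hdeck : deck ≠ [] := by tauto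
    rcases hsh1 rfl with hlen1 | ⟨h1, hscan⟩
    · -- a singleton deck: neither program compares anything
      cases deck with
      | nil => exact absurd rfl hdeck
      | cons d ds =>
        cases ds with
        | nil => rfl
        | cons e es => simp at hlen1
    · simp only [next_lowest, next_lowest_alt, beq_self_eq_true, if_true]
      rw [loop1_eq]
      have hfind : (PySem.List.sorted deck keyB).find? (fun _ => true)
          = deck.foldl (kStep keyB) none := by
        simpa using sorted_find? keyB (fun _ => true) deck
      have hfold : deck.foldl (kStep keyB) none = deck.foldl cStep none :=
        scan_fold deck h1 hscan
      have hhead : (PySem.List.sorted deck keyB).head? = deck.foldl cStep none := by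
        rw [← hfold, ← hfind]
        cases PySem.List.sorted deck keyB with
        | nil => rfl
        | cons m0 t0 => simp [List.find?]
      cases hs : PySem.List.sorted deck keyB with
      | nil =>
        have : deck.foldl cStep none = none := by rw [← hhead, hs]; rfl
        simp [this]
      | cons m0 t0 =>
        have : deck.foldl cStep none = some m0 := by rw [← hhead, hs]; rfl
        simp [this]
  · -- nonempty result: A's candidate scan vs B's scan of the sorted deck
    have hbeq : (result == ([] : List String)) = false := beq_eq_false_iff_ne.mpr hr
    simp only [next_lowest, next_lowest_alt, if_neg hr, hbeq, Bool.false_eq_true, if_false]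
    rw [loop2A, sorted_find? keyB _ deck]
    by_cases hdeck : deck = []
    · subst hdeck; simp
    · rcases hsh2 hr with hnil | ⟨h1, hlast, htie, hscan⟩
      · exact absurd hnil hdeck
      · have hgl : result.getLast? = some (result.getLast hr) := List.getLast?_eq_some_getLast hr
        have hlv : (PySem.List.pyGet? result (-1)).getD "" = result.getLast hr := by
          have hd : (PySem.List.pyGet? result (-1)).getD "" = PySem.List.pyGetD result (-1) "" := by
            simp [PySem.List.pyGetD]
          rw [hd]
          apply PySem.List.pyGetD_neg_one
        have hsame : result.getLast?.getD "" = (PySem.List.pyGet? result (-1)).getD "" := by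
          rw [hgl, hlv]; rfl
        rw [hsame] at hlast htie hscan
        set lastv := (PySem.List.pyGet? result (-1)).getD "" with hlastdef
        rw [filter_bridge lastv deck
          (fun c hc => Or.inr ⟨h1 c hc, hlast, fun t => htie c hc t⟩)]
        have hfeq : deck.filter (fun c => candGT c lastv)
            = deck.filter (fun c => compare_cards c lastv) :=
          List.filter_congr (fun c hc => candGT_eq c lastv (h1 c hc) hlast (htie c hc))
        rw [hfeq] at hscan
        rw [scan_fold (deck.filter (fun c => compare_cards c lastv))
          (fun c hc => h1 c (List.mem_of_mem_filter hc)) hscan]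
        cases hff : (deck.filter (fun c => compare_cards c lastv)).foldl cStep none with
        | none => simp
        | some m => simp

-- ===== VERDICT (by name: the statement is the Claim_ definition above) =====
theorem next_lowest_spec : Claim_equal_next_lowest := by
  intro result deck _ hpre
  unfold Spec_next_lowest
  exact next_lowest_eq result deck hpre
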